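-- pv_equiv track=rewrite | github.com/JoaoVitorA7/2VA | fly.py | distanciaTotal
-- ===== SOURCE A (Python) =====
-- def distanciaTotal(pontosEntrega):
--         distanciaTotal = 0
--         i = 0
--         while i < len(pontosEntrega) - 1:
--             distanciaTotal += abs(pontosEntrega[i][1] - pontosEntrega[i+1][1]) + abs(pontosEntrega[i][2] - pontosEntrega[i+1][2])
--
--             if i+1 == len(pontosEntrega)-1:
--                 distanciaTotal += abs(pontosEntrega[0][1] - pontosEntrega[i+1][1]) + abs(pontosEntrega[0][2] - pontosEntrega[i+1][2])
--
--             i+=1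
--         return distanciaTotal
-- ===== SOURCE B (Python) =====
-- def _path(vs):
--     # sum of absolute differences of consecutive values (open path), recursively
--     if len(vs) < 2:
--         return 0
--     return abs(vs[0] - vs[1]) + _path(vs[1:])
--
-- def _cyclic(vs):
--     # closed-tour variation of one coordinate axis
--     if len(vs) < 2:
--         return 0
--     return _path(vs) + abs(vs[-1] - vs[0])
--
-- def distanciaTotal(pontosEntrega):
--     ys = [p[1] for p in pontosEntrega]
--     zs = [p[2] for p in pontosEntrega]
--     return _cyclic(ys) + _cyclic(zs)
-- ===== Notes on version B (the rewrite author's own statement) =====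
-- stated objective: alternative
-- what changed: B replaces A's single index loop with in-body closure branch by a per-axis decomposition: it extracts the two coordinate lists and sums each axis's closed-tour variation separately via a recursive open-path sum plus one closing term.
import Mathlib
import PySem

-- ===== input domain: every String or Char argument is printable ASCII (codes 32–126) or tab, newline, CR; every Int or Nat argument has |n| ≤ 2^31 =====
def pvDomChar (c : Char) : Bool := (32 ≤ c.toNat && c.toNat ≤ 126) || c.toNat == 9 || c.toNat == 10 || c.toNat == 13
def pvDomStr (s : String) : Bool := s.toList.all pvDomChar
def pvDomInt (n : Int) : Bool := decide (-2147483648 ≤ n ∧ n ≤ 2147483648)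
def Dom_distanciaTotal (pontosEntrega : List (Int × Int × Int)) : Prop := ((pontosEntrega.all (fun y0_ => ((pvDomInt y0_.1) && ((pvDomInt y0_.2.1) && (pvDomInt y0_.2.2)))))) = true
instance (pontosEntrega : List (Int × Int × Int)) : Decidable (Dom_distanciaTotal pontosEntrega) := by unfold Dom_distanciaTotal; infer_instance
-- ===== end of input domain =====

-- B decomposes by coordinate axis: it extracts the two coordinate lists and sums each
-- axis's closed-tour variation by structural recursion (objective: alternative).


-- ===== PORT A =====
-- the while loop of A: i runs while i < len - 1; all indices used are in range, so
-- pointwise indexing is ported with List.getD (the default is never read)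
def distLoopA (pts : List (Int × Int × Int)) (i : Nat) (acc : Int) : Int :=
  if _h : i < pts.length - 1 then
    let acc1 := acc + |(pts.getD i (0,0,0)).2.1 - (pts.getD (i+1) (0,0,0)).2.1|
                    + |(pts.getD i (0,0,0)).2.2 - (pts.getD (i+1) (0,0,0)).2.2|
    let acc2 := if i + 1 = pts.length - 1 then
        acc1 + |(pts.getD 0 (0,0,0)).2.1 - (pts.getD (i+1) (0,0,0)).2.1|
             + |(pts.getD 0 (0,0,0)).2.2 - (pts.getD (i+1) (0,0,0)).2.2|
      else acc1
    distLoopA pts (i+1) acc2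
  else acc
termination_by pts.length - i

def distanciaTotal (pontosEntrega : List (Int × Int × Int)) : Int :=
  distLoopA pontosEntrega 0 0

-- ===== PORT B =====
-- Source B's _path: recursive sum of |v0 - v1| over consecutive values of one axis
def pathSum : List Int → Int
  | a :: b :: r => |a - b| + pathSum (b :: r)
  | _ => 0

-- Source B's _cyclic: vs[-1], vs[0] are in range whenever the branch is taken
def cyclicSum (vs : List Int) : Int :=
  if vs.length < 2 then 0
  else pathSum vs + |vs.getD (vs.length - 1) 0 - vs.getD 0 0|

def distanciaTotal_alt (pontosEntrega : List (Int × Int × Int)) : Int :=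
  cyclicSum (pontosEntrega.map (fun p => p.2.1)) +
  cyclicSum (pontosEntrega.map (fun p => p.2.2))

-- ===== PRECONDITION & SPEC =====
def Spec_distanciaTotal (pontosEntrega : List (Int × Int × Int)) (out : Int) : Prop := out = distanciaTotal_alt pontosEntrega
instance (pontosEntrega : List (Int × Int × Int)) (out : Int) : Decidable (Spec_distanciaTotal pontosEntrega out) := by unfold Spec_distanciaTotal; infer_instance

-- ===== CLAIM (what is proved, stated in full; the proofs are below) =====
def Claim_equal_distanciaTotal : Prop := ∀ (pontosEntrega : List (Int × Int × Int)), Dom_distanciaTotal pontosEntrega → Spec_distanciaTotal pontosEntrega (distanciaTotal pontosEntrega)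

-- ===== LEMMAS AND PROOFS =====

def dman (p q : Int × Int × Int) : Int := |p.2.1 - q.2.1| + |p.2.2 - q.2.2|

-- sum of distances between consecutive points
def adjSum : List (Int × Int × Int) → Int
  | a :: b :: r => dman a b + adjSum (b :: r)
  | _ => 0

-- A's loop, characterized
theorem distLoopA_eq (pts : List (Int × Int × Int)) (i : Nat) (acc : Int) :
    distLoopA pts i acc =
      acc + adjSum (pts.drop i) +
        (if i < pts.length - 1 then
            dman (pts.getD 0 (0,0,0)) (pts.getD (pts.length - 1) (0,0,0)) else 0) := by
  by_cases h : i < pts.length - 1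
  · have hi : i < pts.length := by omega
    have hi1 : i + 1 < pts.length := by omega
    have hd : pts.drop i = pts[i] :: pts.drop (i+1) := List.drop_eq_getElem_cons hi
    have hd1 : pts.drop (i+1) = pts[i+1] :: pts.drop (i+2) := List.drop_eq_getElem_cons hi1
    rw [distLoopA]
    simp only [h, dif_pos]
    rw [distLoopA_eq pts (i+1)]
    have hg : pts.getD i (0,0,0) = pts[i] := List.getD_eq_getElem pts _ hi
    have hg1 : pts.getD (i+1) (0,0,0) = pts[i+1] := List.getD_eq_getElem pts _ hi1
    rw [hd, hd1, adjSum, ← hd1, hg, hg1]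
    by_cases hc : i + 1 = pts.length - 1
    · have hnd : ¬ (i + 1 < pts.length - 1) := by omega
      have : pts.getD (pts.length - 1) (0,0,0) = pts[i+1] := by rw [← hc]; exact hg1
      rw [if_pos hc, if_neg hnd, if_pos True.intro, ← this]
      simp only [dman]
      ring
    · have hlt : i + 1 < pts.length - 1 := by omega
      simp only [if_neg hc, if_pos hlt]
      simp [dman]
      ring
  · rw [distLoopA]
    simp only [h, dif_neg, not_false_iff]
    have : pts.length ≤ i + 1 := by omega
    rcases Nat.lt_or_ge i pts.length with hi | hi
    · have : pts.drop i = [pts[i]] := by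
        have := List.drop_eq_getElem_cons hi
        rw [this, List.drop_eq_nil_of_le (by omega)]
      rw [this]; simp [adjSum]
    · rw [List.drop_eq_nil_of_le hi]; simp [adjSum]
termination_by pts.length - i

-- the two per-axis open-path sums together are the pointwise adjacent sum
theorem pathSum_split (pts : List (Int × Int × Int)) :
    pathSum (pts.map (fun p => p.2.1)) + pathSum (pts.map (fun p => p.2.2))
      = adjSum pts := by
  match pts with
  | [] => simp [pathSum, adjSum]
  | [a] => simp [pathSum, adjSum]
  | a :: b :: r =>
    have ih := pathSum_split (b :: r)
    simp only [List.map_cons, pathSum, adjSum, dman] at *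
    linarith

theorem getD_map_fst (pts : List (Int × Int × Int)) (i : Nat) (hi : i < pts.length) :
    (pts.map (fun p => p.2.1)).getD i 0 = (pts.getD i (0,0,0)).2.1 := by
  rw [List.getD_eq_getElem _ _ (by simpa using hi), List.getD_eq_getElem _ _ hi,
      List.getElem_map]

theorem getD_map_snd (pts : List (Int × Int × Int)) (i : Nat) (hi : i < pts.length) :
    (pts.map (fun p => p.2.2)).getD i 0 = (pts.getD i (0,0,0)).2.2 := by
  rw [List.getD_eq_getElem _ _ (by simpa using hi), List.getD_eq_getElem _ _ hi,
      List.getElem_map]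

-- ===== VERDICT (by name: the statement is the Claim_ definition above) =====
theorem distanciaTotal_spec : Claim_equal_distanciaTotal := by
  intro pts _
  unfold Spec_distanciaTotal distanciaTotal distanciaTotal_alt cyclicSum
  rw [distLoopA_eq]
  simp only [List.drop_zero, List.length_map]
  by_cases h2 : pts.length < 2
  · match pts, h2 with
    | [], _ => simp [adjSum]
    | [a], _ => simp [adjSum]
  · have hn : 0 < pts.length - 1 := by omega
    have hlast : pts.length - 1 < pts.length := by omega
    have h0 : 0 < pts.length := by omega
    rw [if_pos hn, if_neg h2, if_neg h2,
        getD_map_fst _ _ hlast, getD_map_fst _ _ h0,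
        getD_map_snd _ _ hlast, getD_map_snd _ _ h0,
        ← pathSum_split]
    simp only [dman, abs_sub_comm (pts.getD 0 (0,0,0)).2.1,
               abs_sub_comm (pts.getD 0 (0,0,0)).2.2]
    ring
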